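-- pv_equiv track=rewrite | github.com/pcs26g4/qagarden-agentstack | crawler/qa_garden_crawler.py | _sanitize_css_selector
-- ===== SOURCE A (Python) =====
-- def _sanitize_css_selector(selector: str) -> str:
--     """Escape special characters in Tailwind CSS selectors for Playwright.
--     Characters like ':', '!', '[', ']', '&', '=', '/' need to be escaped.
--     """
--     if not selector:
--         return selector
--
--     # v18.1: Skip sanitization for non-CSS selectors
--     if any(selector.startswith(prefix) for prefix in ["xpath=", "//", "text=", "id=", "css=", "point("]):
--         return selector
--
--     # Escape each special character with a backslash
--     for ch in [':', '!', '[', ']', '&', '=', '/']: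
--         selector = selector.replace(ch, f"\\{ch}")
--     return selector
-- ===== SOURCE B (Python) =====
-- def _sanitize_css_selector(selector: str) -> str:
--     """Escape special characters in Tailwind CSS selectors for Playwright."""
--     if not selector:
--         return selector
--     if any(selector.startswith(prefix) for prefix in ["xpath=", "//", "text=", "id=", "css=", "point("]):
--         return selector
--     specials = {':', '!', '[', ']', '&', '=', '/'}
--     return ''.join('\\' + c if c in specials else c for c in selector)
-- ===== Notes on version B (the rewrite author's own statement) =====
-- stated objective: idiomatic
-- what changed: Replaces the seven sequential full-string .replace() passes with one single pass over the characters joining '\'+c for special characters, using a set membership test.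
import Mathlib
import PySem

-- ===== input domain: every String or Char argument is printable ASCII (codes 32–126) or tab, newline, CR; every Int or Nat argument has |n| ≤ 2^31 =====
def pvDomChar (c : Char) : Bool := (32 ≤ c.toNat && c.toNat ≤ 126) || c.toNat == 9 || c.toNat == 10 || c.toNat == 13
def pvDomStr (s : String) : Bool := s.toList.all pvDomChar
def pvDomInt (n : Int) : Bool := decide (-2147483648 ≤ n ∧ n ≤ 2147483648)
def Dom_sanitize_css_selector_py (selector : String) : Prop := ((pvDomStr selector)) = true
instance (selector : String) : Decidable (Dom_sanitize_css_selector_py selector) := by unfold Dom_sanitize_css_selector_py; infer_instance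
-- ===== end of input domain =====

-- B replaces A's seven sequential .replace() passes by one single pass over the characters
-- with a set membership test (objective: idiomatic; same asymptotic cost).

-- ===== PORT A =====
def sanitize_css_selector_py (selector : String) : String :=
  if selector = "" then selector
  else if (["xpath=", "//", "text=", "id=", "css=", "point("].any
            (fun p => PySem.Str.startswith selector p)) then selector
  else
    [':', '!', '[', ']', '&', '=', '/'].foldl
      (fun acc ch => PySem.Str.replace acc (String.ofList [ch]) (String.ofList ['\\', ch]))
      selector

-- ===== PORT B =====
def pvSpecials : List Char := [':', '!', '[', ']', '&', '=', '/']

def sanitize_css_selector_py_alt (selector : String) : String :=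
  if selector = "" then selector
  else if (["xpath=", "//", "text=", "id=", "css=", "point("].any
            (fun p => PySem.Str.startswith selector p)) then selector
  else
    -- ''.join('\\' + c if c in specials else c for c in selector)
    String.ofList (selector.toList.flatMap (fun c => if c ∈ pvSpecials then ['\\', c] else [c]))

-- ===== PRECONDITION & SPEC =====
def Spec_sanitize_css_selector_py (selector : String) (out : String) : Prop := out = sanitize_css_selector_py_alt selector
instance (selector : String) (out : String) : Decidable (Spec_sanitize_css_selector_py selector out) := by unfold Spec_sanitize_css_selector_py; infer_instance

-- ===== CLAIM (what is proved, stated in full; the proofs are below) =====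
def Claim_equal_sanitize_css_selector_py : Prop := ∀ (selector : String), Dom_sanitize_css_selector_py selector → Spec_sanitize_css_selector_py selector (sanitize_css_selector_py selector)

-- ===== LEMMAS AND PROOFS =====

-- single-character replacement with '\'-prefix, as a one-pass map
def pvR (a : Char) (l : List Char) : List Char :=
  l.flatMap (fun c => if c = a then ['\\', a] else [c])

lemma go_single (a : Char) (new : List Char) :
    ∀ (fuel : Nat) (l acc : List Char), l.length ≤ fuel →
      PySem.Chars.replace.go [a] new fuel l acc
        = acc.reverse ++ l.flatMap (fun c => if c = a then new else [c]) := by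
  intro fuel
  induction fuel with
  | zero =>
      intro l acc h
      have hl : l = [] := List.eq_nil_of_length_eq_zero (Nat.le_zero.mp h)
      subst hl
      simp [PySem.Chars.replace.go]
  | succ n ih =>
      intro l acc h
      cases l with
      | nil => simp [PySem.Chars.replace.go]
      | cons c t =>
          have ht : t.length ≤ n := by simpa using h
          by_cases hc : c = a
          · subst hc
            have hpre : [c].isPrefixOf (c :: t) = true := by
              simp [List.isPrefixOf]
            simp only [PySem.Chars.replace.go, hpre, if_pos]
            rw [ih _ _ (by simpa using ht)]
            simp [List.flatMap_cons]
          · have hpre : [a].isPrefixOf (c :: t) = false := by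
              simp [List.isPrefixOf]
              intro h'; exact hc h'.symm
            simp only [PySem.Chars.replace.go, hpre]
            rw [ih _ _ ht]
            simp [List.flatMap_cons, hc]

lemma replace_single (a : Char) (l : List Char) :
    PySem.Chars.replace l [a] ['\\', a] = pvR a l := by
  rw [PySem.Chars.replace]
  simp only [List.isEmpty_cons, if_neg Bool.false_ne_true]
  exact go_single a ['\\', a] l.length l [] (le_refl _)

lemma pvR_append (a : Char) (x y : List Char) :
    pvR a (x ++ y) = pvR a x ++ pvR a y := by
  simp [pvR]

def pvEscB (c : Char) : List Char := if c ∈ pvSpecials then ['\\', c] else [c]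

lemma chain_single (c : Char) :
    pvR '/' (pvR '=' (pvR '&' (pvR ']' (pvR '[' (pvR '!' (pvR ':' [c])))))) = pvEscB c := by
  by_cases h1 : c = ':'
  · subst h1; decide
  by_cases h2 : c = '!'
  · subst h2; decide
  by_cases h3 : c = '['
  · subst h3; decide
  by_cases h4 : c = ']'
  · subst h4; decide
  by_cases h5 : c = '&'
  · subst h5; decide
  by_cases h6 : c = '='
  · subst h6; decide
  by_cases h7 : c = '/'
  · subst h7; decide
  simp [pvR, pvEscB, pvSpecials, h1, h2, h3, h4, h5, h6, h7]

lemma chain_eq (l : List Char) :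
    pvR '/' (pvR '=' (pvR '&' (pvR ']' (pvR '[' (pvR '!' (pvR ':' l)))))) = l.flatMap pvEscB := by
  induction l with
  | nil => rfl
  | cons c t ih =>
      have hsplit : (c :: t) = [c] ++ t := rfl
      rw [hsplit]
      simp only [pvR_append]
      rw [ih, chain_single]
      simp [List.flatMap_cons]

lemma toList_ofList' (l : List Char) : (String.ofList l).toList = l := by simp

-- ===== VERDICT (by name: the statement is the Claim_ definition above) =====
theorem sanitize_css_selector_py_spec : Claim_equal_sanitize_css_selector_py := by
  unfold Claim_equal_sanitize_css_selector_py
  intro s _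
  unfold Spec_sanitize_css_selector_py sanitize_css_selector_py sanitize_css_selector_py_alt
  split_ifs with h1 h2
  · rfl
  · rfl
  · simp only [List.foldl, PySem.Str.replace, toList_ofList', replace_single]
    rw [chain_eq]
    rfl
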